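-- pv_equiv track=rewrite | github.com/Grappe501/KellyGrappe | tools/ai_dashboard_prompt_builder.py | build_dashboard_catalog
-- ===== SOURCE A (Python) =====
-- DASHBOARD_CATEGORY_RULES = {
--     "warRoom": ["command", "metrics", "messaging"],
--     "messaging": ["messaging", "command"],
--     "metrics": ["metrics"],
--     "operations": ["operations", "command", "metrics"],
--     "fundraising": ["fundraising", "metrics", "messaging"],
--     "social": ["social", "messaging", "command"],
-- }
--
-- def build_dashboard_catalog(cards):
--     catalog = {}
--
--     for dashboard_key, categories in DASHBOARD_CATEGORY_RULES.items():
--         catalog[dashboard_key] = {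
--             "categories": categories,
--             "suggestedCards": [c["key"] for c in cards if c["category"] in categories],
--         }
--
--     return catalog
-- ===== SOURCE B (Python) =====
-- DASHBOARD_CATEGORY_RULES = {
--     "warRoom": ["command", "metrics", "messaging"],
--     "messaging": ["messaging", "command"],
--     "metrics": ["metrics"],
--     "operations": ["operations", "command", "metrics"],
--     "fundraising": ["fundraising", "metrics", "messaging"],
--     "social": ["social", "messaging", "command"],
-- }
--
--
-- def build_dashboard_catalog(cards):
--     # Phase 1: skeleton buckets, one per dashboard, in rule order.
--     buckets = [(dk, cats, []) for dk, cats in DASHBOARD_CATEGORY_RULES.items()]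
--     # Phase 2: one distributing pass over the cards.
--     for c in cards:
--         cat = c["category"]
--         for dk, cats, sugg in buckets:
--             if cat in cats:
--                 sugg.append(c["key"])
--     # Phase 3: assemble the catalog.
--     return {dk: {"categories": cats, "suggestedCards": sugg}
--             for dk, cats, sugg in buckets}
-- ===== Notes on version B (the rewrite author's own statement) =====
-- stated objective: alternative
-- what changed: A scans the whole card list once per dashboard (6 comprehensions); B builds a skeleton of buckets once and distributes each card to all matching dashboards in a single pass over the cards.
import Mathlib
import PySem

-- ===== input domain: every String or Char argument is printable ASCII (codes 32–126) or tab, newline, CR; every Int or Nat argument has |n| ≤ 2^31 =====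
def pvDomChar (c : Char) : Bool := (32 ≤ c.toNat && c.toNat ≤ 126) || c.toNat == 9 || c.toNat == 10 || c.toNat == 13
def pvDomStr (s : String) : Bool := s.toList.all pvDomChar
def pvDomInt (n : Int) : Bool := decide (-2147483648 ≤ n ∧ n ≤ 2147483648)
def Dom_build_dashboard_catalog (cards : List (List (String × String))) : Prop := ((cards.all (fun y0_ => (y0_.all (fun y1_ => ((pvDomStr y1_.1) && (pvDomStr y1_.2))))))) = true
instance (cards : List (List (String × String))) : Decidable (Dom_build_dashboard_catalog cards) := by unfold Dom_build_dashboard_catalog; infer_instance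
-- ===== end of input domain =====

-- B replaces A's six repeated scans of the card list (one comprehension per dashboard)
-- by a skeleton of buckets and a single distributing pass over the cards (alternative decomposition, same cost).

-- DASHBOARD_CATEGORY_RULES, shared module constant (dict → assoc list, insertion order)
def pvRules : List (String × List String) :=
  [("warRoom", ["command", "metrics", "messaging"]),
   ("messaging", ["messaging", "command"]),
   ("metrics", ["metrics"]),
   ("operations", ["operations", "command", "metrics"]),
   ("fundraising", ["fundraising", "metrics", "messaging"]),
   ("social", ["social", "messaging", "command"])]

-- ===== PORT A =====
-- catalog = {}; for each rule, catalog[dk] = {...}: keys are fresh and distinct, so the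
-- dict insert appends to the assoc list. c["category"] / c["key"] are KeyError when absent
-- (excluded by Pre_); getD's "" default is never consulted inside Pre_.
def build_dashboard_catalog (cards : List (List (String × String))) : List (String × List (String × List String)) :=
  pvRules.foldl (fun catalog r =>
    catalog ++ [(r.1,
      [("categories", r.2),
       ("suggestedCards",
         cards.foldl (fun acc c =>
           if r.2.contains ((PySem.Dict.mk c).getD "category" "")
           then acc ++ [(PySem.Dict.mk c).getD "key" ""] else acc) [])])]) []

-- ===== PORT B =====
def build_dashboard_catalog_alt (cards : List (List (String × String))) : List (String × List (String × List String)) :=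
  ((cards.foldl (fun bs c =>
      bs.map (fun e =>
        if e.2.1.contains ((PySem.Dict.mk c).getD "category" "")
        then (e.1, e.2.1, e.2.2 ++ [(PySem.Dict.mk c).getD "key" ""])
        else e))
    (pvRules.map (fun r => (r.1, r.2, ([] : List String))))).map
    (fun e => (e.1, [("categories", e.2.1), ("suggestedCards", e.2.2)])))

-- ===== PRECONDITION & SPEC =====
-- Pre_ excludes exactly the inputs where A raises KeyError: a card without a "category"
-- entry, or a card whose category matches some dashboard but which has no "key" entry.
def Pre_build_dashboard_catalog (cards : List (List (String × String))) : Prop :=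
  ∀ c ∈ cards, (PySem.Dict.mk c).contains "category" = true ∧
    (((PySem.Dict.mk c).getD "category" "") ∈
        ["command", "metrics", "messaging", "operations", "fundraising", "social"] →
      (PySem.Dict.mk c).contains "key" = true)
instance (cards : List (List (String × String))) : Decidable (Pre_build_dashboard_catalog cards) := by unfold Pre_build_dashboard_catalog; infer_instance

def pvWitness_build_dashboard_catalog : (List (List (String × String))) :=
  [[("category", "metrics"), ("key", "m1")], [("category", "misc")]]

def Spec_build_dashboard_catalog (cards : List (List (String × String))) (out : List (String × List (String × List String))) : Prop := out = build_dashboard_catalog_alt cards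
instance (cards : List (List (String × String))) (out : List (String × List (String × List String))) : Decidable (Spec_build_dashboard_catalog cards out) := by unfold Spec_build_dashboard_catalog; infer_instance

-- ===== CLAIM (what is proved, stated in full; the proofs are below) =====
def Claim_equal_build_dashboard_catalog : Prop := ∀ (cards : List (List (String × String))), Dom_build_dashboard_catalog cards → Pre_build_dashboard_catalog cards → Spec_build_dashboard_catalog cards (build_dashboard_catalog cards)

-- ===== LEMMAS AND PROOFS =====

-- the category test and key extraction shared (as values) by both ports
def pvP (cats : List String) (c : List (String × String)) : Bool :=
  cats.contains ((PySem.Dict.mk c).getD "category" "")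
def pvF (c : List (String × String)) : String := (PySem.Dict.mk c).getD "key" ""

-- B's distributing fold fills every bucket with exactly the filtered keys, in card order
theorem pv_distr (cards : List (List (String × String)))
    (bs : List (String × List String × List String)) :
    cards.foldl (fun bs c =>
      bs.map (fun e =>
        if e.2.1.contains ((PySem.Dict.mk c).getD "category" "")
        then (e.1, e.2.1, e.2.2 ++ [(PySem.Dict.mk c).getD "key" ""])
        else e)) bs
    = bs.map (fun e => (e.1, e.2.1, e.2.2 ++ (cards.filter (pvP e.2.1)).map pvF)) := by
  induction cards generalizing bs with
  | nil => simp
  | cons c cs ih =>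
    rw [List.foldl_cons, ih, List.map_map]
    apply List.map_congr_left
    intro e _
    simp only [Function.comp, pvP, List.filter_cons]
    by_cases h : ((PySem.Dict.mk c).getD "category" "") ∈ e.2.1
    · simp [h, pvF, List.append_assoc]
    · simp [h]

theorem build_dashboard_catalog_spec : Claim_equal_build_dashboard_catalog := by
  intro cards _ _
  unfold Spec_build_dashboard_catalog build_dashboard_catalog build_dashboard_catalog_alt
  rw [pv_distr]
  simp only [pvRules, List.foldl_cons, List.foldl_nil, List.map_cons, List.map_nil,
    PySem.List.foldl_append_if, List.nil_append, List.cons_append]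
  rfl
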